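-- pv_equiv track=rewrite | github.com/angele-d/Blokus-game | MinMax jeu de nim/minmax.py | max_tuple
-- ===== SOURCE A (Python) =====
-- def max_tuple(tab):
--     '''
--     Renvoie un tuple formé de deux nombres :
--     1 : indice du tuple qui a la plus grande valeur en deuxième position
--     2 : la valeur de ce maximum
--     :param tab: (list) liste de tuple contenant des couples d'entier
--     :return: (tuple)
--     >>> max_tuple([(1, 0), (2, 0), (3, 10)])
--     (2, 10)
--     '''
--     indice_mx = 0
--     mx = tab[0][1]
--     for j in range(1,len(tab)):
--         if tab[j][1] > mx:
--             mx = tab[j][1]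
--             indice_mx = j
--     return (indice_mx, mx)
-- ===== SOURCE B (Python) =====
-- def max_tuple(tab):
--     # Two-pass re-implementation: first compute the maximum of the second
--     # elements, then return the first index achieving it.
--     mx = max(p[1] for p in tab)
--     for i, p in enumerate(tab):
--         if p[1] == mx:
--             return (i, mx)
-- ===== Notes on version B (the rewrite author's own statement) =====
-- stated objective: alternative
-- what changed: Replaces the single fused tracking loop (carrying a running max and its index) with two separate passes: a max() over the second elements, then a scan for the first index equal to that max.
import Mathlib
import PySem

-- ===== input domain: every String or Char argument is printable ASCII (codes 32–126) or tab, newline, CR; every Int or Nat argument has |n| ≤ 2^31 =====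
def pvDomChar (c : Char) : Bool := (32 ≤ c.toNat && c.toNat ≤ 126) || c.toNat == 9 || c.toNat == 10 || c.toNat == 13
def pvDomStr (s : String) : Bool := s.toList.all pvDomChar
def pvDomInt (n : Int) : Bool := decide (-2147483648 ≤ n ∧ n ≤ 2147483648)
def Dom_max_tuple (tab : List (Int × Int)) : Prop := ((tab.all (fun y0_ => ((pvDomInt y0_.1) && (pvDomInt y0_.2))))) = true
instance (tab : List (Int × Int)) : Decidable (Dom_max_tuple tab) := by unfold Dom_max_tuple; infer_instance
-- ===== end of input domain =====

-- B replaces A's fused index-tracking loop by two passes (max of seconds, then first index achieving it); same cost, different decomposition.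


-- ===== PORT A =====
-- literal transliteration: indice_mx = 0; mx = tab[0][1]; for j in range(1, len(tab)): if tab[j][1] > mx: update; return (indice_mx, mx)
def max_tuple (tab : List (Int × Int)) : Int × Int :=
  match tab with
  | [] => (0, 0)   -- Python raises IndexError on tab[0]; excluded by Pre_max_tuple
  | p0 :: _ =>
    (PySem.List.pyRange 1 (tab.length : Int) 1).foldl
      (fun s j =>
        if ((PySem.List.pyGet? tab j).getD (0, 0)).2 > s.2 then
          (j, ((PySem.List.pyGet? tab j).getD (0, 0)).2)
        else s)
      ((0 : Int), p0.2)

-- ===== PORT B =====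
-- second pass of Source B: for i, p in enumerate(tab): if p[1] == mx: return (i, mx)
def maxTupleSearch (l : List (Int × Int)) (i : Int) (mx : Int) : Int × Int :=
  match l with
  | [] => (0, mx)   -- unreachable: mx occurs in the list
  | p :: t => if p.2 = mx then (i, mx) else maxTupleSearch t (i + 1) mx

def max_tuple_alt (tab : List (Int × Int)) : Int × Int :=
  match tab.map Prod.snd with
  | [] => (0, 0)   -- Python's max() raises ValueError; excluded by Pre_max_tuple
  | v :: vs =>
    let mx := vs.foldl max v
    maxTupleSearch tab 0 mx

-- ===== PRECONDITION & SPEC =====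
-- Pre_ excludes exactly the empty list, on which A raises IndexError (and B ValueError).
def Pre_max_tuple (tab : List (Int × Int)) : Prop := tab ≠ []
instance (tab : List (Int × Int)) : Decidable (Pre_max_tuple tab) := by unfold Pre_max_tuple; infer_instance
def pvWitness_max_tuple : (List (Int × Int)) := [(1, 0), (2, 0), (3, 10)]
def Spec_max_tuple (tab : List (Int × Int)) (out : Int × Int) : Prop := out = max_tuple_alt tab
instance (tab : List (Int × Int)) (out : Int × Int) : Decidable (Spec_max_tuple tab out) := by unfold Spec_max_tuple; infer_instance

-- ===== CLAIM (what is proved, stated in full; the proofs are below) =====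
def Claim_equal_max_tuple : Prop := ∀ (tab : List (Int × Int)), Dom_max_tuple tab → Pre_max_tuple tab → Spec_max_tuple tab (max_tuple tab)

-- ===== LEMMAS AND PROOFS =====

-- A's loop, restated structurally over the tail with its running index.
def maxTupleLoopA (l : List (Int × Int)) (j : Int) (s : Int × Int) : Int × Int :=
  match l with
  | [] => s
  | x :: t => maxTupleLoopA t (j + 1) (if x.2 > s.2 then (j, x.2) else s)

-- the running maximum of the second elements
def maxSnd (t : List (Int × Int)) (m0 : Int) : Int := (t.map Prod.snd).foldl max m0

theorem maxSnd_cons (x : Int × Int) (t : List (Int × Int)) (m0 : Int) :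
    maxSnd (x :: t) m0 = maxSnd t (max m0 x.2) := rfl

theorem le_maxSnd (t : List (Int × Int)) (m0 : Int) : m0 ≤ maxSnd t m0 := by
  induction t generalizing m0 with
  | nil => exact le_refl _
  | cons x t ih =>
    rw [maxSnd_cons]
    exact le_trans (le_max_left _ _) (ih _)

theorem mem_le_maxSnd (t : List (Int × Int)) (m0 : Int) :
    ∀ x ∈ t, x.2 ≤ maxSnd t m0 := by
  induction t generalizing m0 with
  | nil => intro x hx; cases hx
  | cons y t ih =>
    intro x hx
    rw [maxSnd_cons]
    rcases List.mem_cons.mp hx with h | h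
    · subst h; exact le_trans (le_max_right _ _) (le_maxSnd _ _)
    · exact ih _ x h

theorem loopA_of_all_le (t : List (Int × Int)) (j : Int) (s : Int × Int)
    (h : ∀ x ∈ t, x.2 ≤ s.2) : maxTupleLoopA t j s = s := by
  induction t generalizing j with
  | nil => rfl
  | cons x t ih =>
    have hx : x.2 ≤ s.2 := h x (List.mem_cons_self ..)
    simp only [maxTupleLoopA, if_neg (not_lt.mpr hx)]
    exact ih (j + 1) (fun y hy => h y (List.mem_cons_of_mem _ hy))

-- key: when the prefix maximum m0 is beaten inside t, the tracking loop returns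
-- exactly the first index (from j) whose second component equals the overall max.
theorem loopA_eq_search (t : List (Int × Int)) :
    ∀ (j i0 m0 : Int), m0 < maxSnd t m0 →
      maxTupleLoopA t j (i0, m0) = maxTupleSearch t j (maxSnd t m0) := by
  induction t with
  | nil => intro j i0 m0 h; exact absurd h (lt_irrefl _)
  | cons x t ih =>
    intro j i0 m0 h
    rw [maxSnd_cons] at h ⊢
    by_cases hx : x.2 > m0
    · have hmax : max m0 x.2 = x.2 := max_eq_right (le_of_lt hx)
      rw [hmax] at h ⊢
      simp only [maxTupleLoopA, if_pos hx]
      by_cases htop : x.2 = maxSnd t x.2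
      · -- head already achieves the overall max: loop never updates again
        rw [loopA_of_all_le t (j + 1) (j, x.2)
            (fun y hy => htop ▸ mem_le_maxSnd t x.2 y hy)]
        simp [maxTupleSearch, ← htop]
      · have hlt : x.2 < maxSnd t x.2 := lt_of_le_of_ne (le_maxSnd t x.2) htop
        rw [ih (j + 1) j x.2 hlt]
        have hne : ¬ x.2 = maxSnd t x.2 := htop
        simp [maxTupleSearch, hne]
    · have hxle : x.2 ≤ m0 := not_lt.mp hx
      have hmax : max m0 x.2 = m0 := max_eq_left hxle
      rw [hmax] at h ⊢
      simp only [maxTupleLoopA, if_neg hx]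
      rw [ih (j + 1) i0 m0 h]
      have hne : ¬ x.2 = maxSnd t m0 := by
        intro he; exact absurd (he ▸ lt_of_le_of_lt hxle h) (lt_irrefl _)
      simp [maxTupleSearch, hne]

-- bridge: A's pyRange/pyGet? fold equals the structural loop over the tail
theorem bridge_pyRange (tab : List (Int × Int)) :
    ∀ (k : Nat) (s : Int × Int), k ≤ tab.length →
      (PySem.List.pyRange (k : Int) (tab.length : Int) 1).foldl
        (fun s j =>
          if ((PySem.List.pyGet? tab j).getD (0, 0)).2 > s.2 then
            (j, ((PySem.List.pyGet? tab j).getD (0, 0)).2)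
          else s) s
      = maxTupleLoopA (tab.drop k) (k : Int) s := by
  intro k s hk
  induction hn : tab.length - k generalizing k s with
  | zero =>
    have hke : k = tab.length := le_antisymm hk (Nat.le_of_sub_eq_zero hn)
    rw [PySem.List.pyRange_one_eq_nil (by subst hke; exact le_refl _)]
    rw [hke, List.drop_length]
    rfl
  | succ n ih =>
    have hklt : k < tab.length := by omega
    rw [PySem.List.pyRange_one_cons (by exact_mod_cast hklt)]
    obtain ⟨x, hx⟩ : ∃ x, tab[k]? = some x := ⟨tab[k], List.getElem?_eq_getElem hklt⟩
    have hget : PySem.List.pyGet? tab (k : Int) = some x := by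
      rw [PySem.List.pyGet?_natCast, hx]
    have hdrop : tab.drop k = x :: tab.drop (k + 1) := by
      rw [List.drop_eq_getElem_cons hklt, List.getElem?_eq_getElem hklt] at *
      simp_all
    simp only [List.foldl_cons, hget, Option.getD_some]
    have := ih (k + 1) (if x.2 > s.2 then ((k : Int), x.2) else s) (by omega) (by omega)
    push_cast at this ⊢
    rw [this, hdrop]
    rfl

-- ===== VERDICT (by name: the statement is the Claim_ definition above) =====
theorem max_tuple_spec : Claim_equal_max_tuple := by
  intro tab _ hpre
  unfold Spec_max_tuple
  match tab with
  | [] => exact absurd rfl hpre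
  | p :: t =>
    have hb : max_tuple_alt (p :: t) = maxTupleSearch (p :: t) 0 (maxSnd t p.2) := by
      simp [max_tuple_alt, maxSnd]
    have ha : max_tuple (p :: t) = maxTupleLoopA t 1 (0, p.2) := by
      unfold max_tuple
      have := bridge_pyRange (p :: t) 1 ((0 : Int), p.2) (by simp)
      simpa using this
    rw [ha, hb]
    by_cases htop : p.2 = maxSnd t p.2
    · rw [loopA_of_all_le t 1 (0, p.2) (fun y hy => htop ▸ mem_le_maxSnd t p.2 y hy)]
      simp [maxTupleSearch, ← htop]
    · have hlt : p.2 < maxSnd t p.2 := lt_of_le_of_ne (le_maxSnd t p.2) htop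
      rw [loopA_eq_search t 1 0 p.2 hlt]
      simp [maxTupleSearch, htop]
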